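-- pv_equiv track=rewrite | github.com/qiskit-community/qiskit-dynamics | qiskit_dynamics/perturbation/power_series_utils.py | submultiset_filter
-- ===== SOURCE A (Python) =====
-- from typing import List, Optional, Callable, Tuple
--
-- def is_submultiset(A: List[int], B: List[int]) -> bool:
--     """Check if A is a submultiset of B, where A and B are specified as lists of ints."""
--
--     # get the unique elements of A
--     A_set = set(A)
--
--     for elem in A_set:
--         if A.count(elem) > B.count(elem):
--             return False
--
--     return True
--
-- def submultiset_filter(multiset_candidates: List, multiset_list: List) -> List:
--     """Filter the list of multiset_candidates based on whether they are a
--     submultiset of an element in multiset_list.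
--     """
--
--     filtered_multisets = []
--     for candidate in multiset_candidates:
--         for multiset in multiset_list:
--             if is_submultiset(candidate, multiset):
--                 filtered_multisets.append(candidate)
--                 break
--
--     return filtered_multisets
-- ===== SOURCE B (Python) =====
-- def _sub_sorted(a, b):
--     """a and b are sorted lists; return True iff multiset a is contained in b,
--     by a single merge-style walk with a pointer into b."""
--     i = 0
--     for x in a:
--         while i < len(b) and b[i] < x:
--             i += 1
--         if i >= len(b) or b[i] != x:
--             return False
--         i += 1
--     return True
--
--
-- def submultiset_filter(multiset_candidates, multiset_list):
--     """Sort-and-merge alternative: pre-sort every multiset once, sort each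
--     candidate, and decide containment by one linear merge pass instead of
--     repeated count scans."""
--     sorted_list = [sorted(m) for m in multiset_list]
--     return [c for c in multiset_candidates
--             if any(_sub_sorted(sorted(c), m) for m in sorted_list)]
-- ===== Notes on version B (the rewrite author's own statement) =====
-- stated objective: alternative
-- what changed: Replaces the count-based submultiset test with a sort-then-merge algorithm: every multiset in multiset_list is sorted once up front, each candidate is sorted, and containment is decided by a single two-pointer merge walk over the two sorted lists; the break-on-first-match loop becomes a comprehension with any().
import Mathlib
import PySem

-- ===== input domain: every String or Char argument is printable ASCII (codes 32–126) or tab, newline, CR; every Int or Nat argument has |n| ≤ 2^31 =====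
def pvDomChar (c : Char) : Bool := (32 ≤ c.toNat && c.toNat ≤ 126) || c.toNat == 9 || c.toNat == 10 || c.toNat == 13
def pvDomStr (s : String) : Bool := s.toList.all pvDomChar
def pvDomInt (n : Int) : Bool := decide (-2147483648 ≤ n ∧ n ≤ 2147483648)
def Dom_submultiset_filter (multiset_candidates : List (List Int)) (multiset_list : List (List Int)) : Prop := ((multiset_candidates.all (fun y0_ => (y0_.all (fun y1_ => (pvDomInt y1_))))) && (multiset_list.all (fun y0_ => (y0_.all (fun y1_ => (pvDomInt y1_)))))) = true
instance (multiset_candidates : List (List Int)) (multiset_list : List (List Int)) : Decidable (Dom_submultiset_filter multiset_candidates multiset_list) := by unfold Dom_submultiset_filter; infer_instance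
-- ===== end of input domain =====

-- B decides submultiset containment by sorting and a single two-pointer merge walk instead of A's repeated count scans (an alternative algorithm).

-- ===== PORT A =====
-- loop over set(A), early 'return False' = List.all over the deduplicated elements
def is_submultiset (A B : List Int) : Bool :=
  (PySem.Set.ofList A).all (fun elem => decide (PySem.List.count A elem ≤ PySem.List.count B elem))

-- inner 'for multiset in multiset_list: … break' as structural recursion
def pvInnerA (candidate : List Int) (ms : List (List Int)) (acc : List (List Int)) : List (List Int) :=
  match ms with
  | [] => acc
  | m :: rest => if is_submultiset candidate m then acc ++ [candidate] else pvInnerA candidate rest acc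

def submultiset_filter (multiset_candidates : List (List Int)) (multiset_list : List (List Int)) : List (List Int) :=
  multiset_candidates.foldl (fun acc candidate => pvInnerA candidate multiset_list acc) []

-- ===== PORT B =====
-- the pointer walk 'for x in a: while b[i] < x: i += 1; require b[i] == x' as
-- structural recursion on the two sorted lists (advancing i = dropping the head of b)
def pvSubSorted : List Int → List Int → Bool
  | [], _ => true
  | _ :: _, [] => false
  | x :: a, y :: b =>
    if y < x then pvSubSorted (x :: a) b
    else if y = x then pvSubSorted a b
    else false

def submultiset_filter_alt (multiset_candidates : List (List Int)) (multiset_list : List (List Int)) : List (List Int) :=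
  let sorted_list := multiset_list.map (fun m => PySem.List.sorted m (fun x => x))
  multiset_candidates.filter (fun c =>
    sorted_list.any (fun m => pvSubSorted (PySem.List.sorted c (fun x => x)) m))

-- ===== PRECONDITION & SPEC =====
def Spec_submultiset_filter (multiset_candidates : List (List Int)) (multiset_list : List (List Int)) (out : List (List Int)) : Prop := out = submultiset_filter_alt multiset_candidates multiset_list
instance (multiset_candidates : List (List Int)) (multiset_list : List (List Int)) (out : List (List Int)) : Decidable (Spec_submultiset_filter multiset_candidates multiset_list out) := by unfold Spec_submultiset_filter; infer_instance

-- ===== CLAIM (what is proved, stated in full; the proofs are below) =====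
def Claim_equal_submultiset_filter : Prop := ∀ (multiset_candidates : List (List Int)) (multiset_list : List (List Int)), Dom_submultiset_filter multiset_candidates multiset_list → Spec_submultiset_filter multiset_candidates multiset_list (submultiset_filter multiset_candidates multiset_list)

-- ===== LEMMAS AND PROOFS =====

-- A's break-on-first-match inner loop is an 'any' test
theorem pvInnerA_eq (c : List Int) (ms : List (List Int)) (acc : List (List Int)) :
    pvInnerA c ms acc = if ms.any (fun m => is_submultiset c m) then acc ++ [c] else acc := by
  induction ms with
  | nil => simp [pvInnerA]
  | cons m rest ih =>
    simp only [pvInnerA, List.any_cons]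
    by_cases h : is_submultiset c m = true
    · simp [h]
    · simp [h, ih]

-- A's whole fold is append-after-filter
theorem pvFoldlA_eq (ml cands acc : List (List Int)) :
    cands.foldl (fun acc c => pvInnerA c ml acc) acc
      = acc ++ cands.filter (fun c => ml.any (fun m => is_submultiset c m)) := by
  induction cands generalizing acc with
  | nil => simp
  | cons c rest ih =>
    rw [List.foldl_cons, pvInnerA_eq]
    by_cases h : (ml.any fun m => is_submultiset c m) = true
    · rw [if_pos h, ih]; simp [h]
    · rw [if_neg h, ih]; simp [h]

-- A's count-based test decides the Subperm (submultiset) relation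
theorem is_submultiset_iff (c m : List Int) : is_submultiset c m = true ↔ c.Subperm m := by
  rw [List.subperm_ext_iff]
  unfold is_submultiset
  simp [PySem.Set.mem_ofList, PySem.List.count]

-- B's merge walk decides Subperm on sorted lists
theorem pvSubSorted_iff (b a : List Int) (ha : a.Pairwise (· ≤ ·)) (hb : b.Pairwise (· ≤ ·)) :
    pvSubSorted a b = true ↔ a.Subperm b := by
  induction b generalizing a with
  | nil =>
    cases a with
    | nil => simp [pvSubSorted]
    | cons x a' =>
      simp only [pvSubSorted, Bool.false_eq_true, false_iff]
      intro h
      have := h.length_le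
      simp at this
  | cons y b' ih =>
    cases a with
    | nil => simp [pvSubSorted]
    | cons x a' =>
      have hb' : b'.Pairwise (· ≤ ·) := hb.tail
      have hyb : ∀ z ∈ b', y ≤ z := (List.pairwise_cons.mp hb).1
      have hxa : ∀ z ∈ a', x ≤ z := (List.pairwise_cons.mp ha).1
      simp only [pvSubSorted]
      rcases lt_trichotomy y x with hlt | heq | hgt
      · rw [if_pos hlt, ih (x :: a') ha hb']
        constructor
        · intro h
          exact h.trans (List.sublist_cons_self y b').subperm
        · intro h
          rw [List.subperm_ext_iff] at h ⊢
          intro z hz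
          have hxz : x ≤ z := by
            rcases List.mem_cons.mp hz with h1 | h1
            · exact h1 ▸ le_refl z
            · exact hxa z h1
          have hzy : z ≠ y := by intro e; subst e; exact absurd hxz (not_le_of_gt hlt)
          have := h z hz
          simp only [List.count_cons, beq_iff_eq] at this ⊢
          rw [if_neg (Ne.symm hzy), Nat.add_zero] at this
          exact this
      · subst heq
        rw [if_neg (lt_irrefl y), if_pos rfl, ih a' ha.tail hb']
        exact (List.subperm_cons y).symm
      · rw [if_neg (asymm hgt), if_neg (ne_of_lt hgt).symm]
        simp only [Bool.false_eq_true, false_iff]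
        intro h
        rw [List.subperm_ext_iff] at h
        have := h x (List.mem_cons_self)
        have hx0 : (y :: b').count x = 0 := by
          rw [List.count_eq_zero]
          intro hmem
          rcases List.mem_cons.mp hmem with h1 | h1
          · exact absurd h1 (ne_of_lt hgt)
          · exact absurd (hyb x h1) (not_le_of_gt hgt)
        rw [hx0] at this
        simp at this

-- the two tests agree after sorting
theorem tests_agree (c m : List Int) :
    pvSubSorted (PySem.List.sorted c (fun x => x)) (PySem.List.sorted m (fun x => x))
      = is_submultiset c m := by
  rw [Bool.eq_iff_iff, pvSubSorted_iff _ _ (PySem.List.sorted_pairwise c (fun x => x)) (PySem.List.sorted_pairwise m (fun x => x)), is_submultiset_iff]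
  constructor
  · intro h
    exact ((PySem.List.sorted_perm c (fun x => x) false).symm.subperm).trans
      (h.trans (PySem.List.sorted_perm m (fun x => x) false).subperm)
  · intro h
    exact ((PySem.List.sorted_perm c (fun x => x) false).subperm).trans
      (h.trans (PySem.List.sorted_perm m (fun x => x) false).symm.subperm)

-- ===== VERDICT (by name: the statement is the Claim_ definition above) =====
theorem submultiset_filter_spec : Claim_equal_submultiset_filter := by
  intro cands ml _
  show submultiset_filter cands ml = submultiset_filter_alt cands ml
  simp only [submultiset_filter, submultiset_filter_alt]
  rw [pvFoldlA_eq, List.nil_append]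
  apply List.filter_congr
  intro c _
  rw [List.any_map]
  apply congrArg
  funext m
  exact (tests_agree c m).symm
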